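-- pv_equiv track=rewrite | github.com/HDRah/Crossin- | 阿姆斯特朗数.py | near_Amu
-- ===== SOURCE A (Python) =====
-- def judge_Amu(n):
--     if sum([int(k)**len(str(n)) for k in str(n)])==n:
--         return True
--
-- def near_Amu(n):
--     down, up=n, n
--     while True:
--         if judge_Amu(down):
--             return down
--         elif judge_Amu(up):
--             return up
--         down-=1
--         up+=1
-- ===== SOURCE B (Python) =====
-- def _is_narc(m):
--     if m < 0:
--         return False
--     t, digs = m, []
--     while t > 0:
--         digs.append(t % 10)
--         t //= 10
--     if not digs:
--         digs = [0]
--     p = len(digs)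
--     return sum(x ** p for x in digs) == m
--
-- def near_Amu(n):
--     d = n
--     while not _is_narc(d):
--         d -= 1
--     u = n
--     while not _is_narc(u):
--         u += 1
--     return d if n - d <= u - n else u
-- ===== Notes on version B (the rewrite author's own statement) =====
-- stated objective: alternative
-- what changed: B replaces A's single interleaved two-sided walk with string-based digit tests by two independent one-sided scans (nearest narcissistic number below, then above) using a purely arithmetic digit-extraction test, returning the lower on ties.
-- outside the precondition, e.g. on near_Amu(-5): A raises ValueError, B does not finish within the time limit
import Mathlib
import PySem

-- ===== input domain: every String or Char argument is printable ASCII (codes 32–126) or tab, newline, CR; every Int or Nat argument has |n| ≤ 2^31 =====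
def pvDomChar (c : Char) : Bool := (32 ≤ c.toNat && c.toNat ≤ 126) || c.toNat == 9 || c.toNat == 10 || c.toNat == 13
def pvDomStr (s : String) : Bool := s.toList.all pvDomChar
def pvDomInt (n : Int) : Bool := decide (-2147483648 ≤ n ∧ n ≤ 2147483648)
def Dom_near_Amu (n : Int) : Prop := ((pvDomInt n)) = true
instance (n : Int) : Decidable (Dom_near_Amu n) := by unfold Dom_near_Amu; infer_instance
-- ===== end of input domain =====

-- B replaces A's interleaved two-sided walk (string-based digit test) by two independent
-- one-sided scans with an arithmetic digit test and a lower-wins tie comparison; alternative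
-- decomposition, same asymptotic cost.  A raises ValueError on n < 0 (int('-')); Pre_ excludes those.


-- ===== PORT A =====
-- judge_Amu returns True or None in Python; ported as Bool (None = falsy).
-- int(k) is ported as (ofStr? …).getD 0; under Pre_ every char of str(n) is a digit, so
-- ofStr? is always `some` on the inputs the claim covers (int(k) raising is exactly A raising,
-- excluded by Pre_).
def judge_Amu (n : Int) : Bool :=
  ((PySem.Int.toStr n).toList.map
      (fun k => ((PySem.Int.ofStr? (String.ofList [k])).getD 0)
                  ^ (PySem.Str.len (PySem.Int.toStr n)).toNat)).sum == n

-- the `while True` loop; fuel n.toNat+1 suffices because 0 is narcissistic, so under Pre_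
-- (0 ≤ n) the loop returns within n+1 iterations; the fuel-0 branch is unreachable there.
def nearLoopA (fuel : Nat) (down up : Int) : Int :=
  match fuel with
  | 0 => 0
  | f + 1 =>
    if judge_Amu down then down
    else if judge_Amu up then up
    else nearLoopA f (down - 1) (up + 1)

def near_Amu (n : Int) : Int := nearLoopA (n.toNat + 1) n n

-- ===== PORT B =====
-- arithmetic digit extraction (Source B's while t > 0 loop; Python % and // agree with Nat ops here)
def digitsB (t : Nat) : List Nat :=
  if h : t = 0 then [] else t % 10 :: digitsB (t / 10)
decreasing_by exact Nat.div_lt_self (Nat.pos_of_ne_zero h) (by norm_num)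

def isNarc (m : Int) : Bool :=
  if m < 0 then false
  else
    let digs := digitsB m.toNat
    let digs := if digs = [] then [0] else digs
    let p := digs.length
    let s : Nat := (digs.map (fun x => x ^ p)).sum
    (s : Int) == m

-- Source B's first while loop; fuel n.toNat+1 suffices since 0 is narcissistic
def downScan (fuel : Nat) (d : Int) : Int :=
  match fuel with
  | 0 => d
  | f + 1 => if isNarc d then d else downScan f (d - 1)

-- Source B's second while loop; fuel (4679307775 - n).toNat suffices on Dom ∩ Pre_ since
-- 4679307774 is narcissistic and every admitted n is below it
def upScan (fuel : Nat) (u : Int) : Int :=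
  match fuel with
  | 0 => u
  | f + 1 => if isNarc u then u else upScan f (u + 1)

def near_Amu_alt (n : Int) : Int :=
  let d := downScan (n.toNat + 1) n
  let u := upScan (4679307775 - n).toNat n
  if n - d ≤ u - n then d else u

-- ===== PRECONDITION & SPEC =====
-- A raises ValueError for n < 0 (judge_Amu calls int('-') on the sign character); Pre_ excludes exactly those.
def Pre_near_Amu (n : Int) : Prop := 0 ≤ n
instance (n : Int) : Decidable (Pre_near_Amu n) := by unfold Pre_near_Amu; infer_instance
def pvWitness_near_Amu : Int := 153

def Spec_near_Amu (n : Int) (out : Int) : Prop := out = near_Amu_alt n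
instance (n : Int) (out : Int) : Decidable (Spec_near_Amu n out) := by unfold Spec_near_Amu; infer_instance

-- ===== CLAIM (what is proved, stated in full; the proofs are below) =====
def Claim_equal_near_Amu : Prop := ∀ (n : Int), Dom_near_Amu n → Pre_near_Amu n → Spec_near_Amu n (near_Amu n)

-- ===== LEMMAS AND PROOFS =====

-- digitsB is Nat.digits 10
theorem digitsB_eq (n : Nat) : digitsB n = Nat.digits 10 n := by
  induction n using Nat.strong_induction_on with
  | _ n ih =>
    rw [digitsB]
    by_cases h : n = 0
    · simp [h]
    · rw [dif_neg h, ih (n / 10) (Nat.div_lt_self (Nat.pos_of_ne_zero h) (by norm_num)),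
        Nat.digits_def' (by norm_num : 1 < 10) (Nat.pos_of_ne_zero h)]

-- Nat.toDigits via Nat.digits
theorem toDigitsCore_eq (f : Nat) : ∀ (n : Nat) (l : List Char), 0 < f → n < 10 ^ f →
    Nat.toDigitsCore 10 f n l =
      (if n = 0 then '0' :: l else ((Nat.digits 10 n).map Nat.digitChar).reverse ++ l) := by
  induction f with
  | zero => intro n l h; omega
  | succ f ih =>
    intro n l _ hlt
    rw [Nat.toDigitsCore]
    by_cases h0 : n = 0
    · subst h0; norm_num [Nat.digitChar]
    · by_cases hs : n < 10
      · have : n / 10 = 0 := Nat.div_eq_of_lt hs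
        rw [if_pos this, if_neg h0,
          Nat.digits_def' (by norm_num : 1 < 10) (Nat.pos_of_ne_zero h0),
          Nat.digits_eq_nil_iff_eq_zero.mpr this]
        simp [Nat.mod_eq_of_lt hs]
      · have hdiv : n / 10 ≠ 0 := by omega
        have hf : 0 < f := by
          rcases Nat.eq_zero_or_pos f with rfl | hf
          · rw [pow_one] at hlt; omega
          · exact hf
        have hq : n / 10 < 10 ^ f :=
          (Nat.div_lt_iff_lt_mul (by norm_num)).mpr (by rw [← pow_succ]; exact hlt)
        rw [if_neg hdiv, ih (n / 10) _ hf hq, if_neg hdiv,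
          Nat.digits_def' (by norm_num : 1 < 10) (Nat.pos_of_ne_zero h0)]
        simp [h0]

theorem toDigits_eq (n : Nat) :
    Nat.toDigits 10 n = (if n = 0 then ['0'] else ((Nat.digits 10 n).map Nat.digitChar).reverse) := by
  have h : n < 10 ^ (n + 1) := by
    calc n < 2 ^ (n + 1) := Nat.lt_two_pow_self.trans (Nat.pow_lt_pow_succ (by norm_num))
    _ ≤ 10 ^ (n + 1) := Nat.pow_le_pow_left (by norm_num) _
  have := toDigitsCore_eq (n + 1) n [] (Nat.succ_pos n) h
  rw [Nat.toDigits, this]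
  split <;> simp

theorem charVal (d : Nat) (hd : d < 10) :
    (PySem.Int.ofStr? (String.ofList [Nat.digitChar d])).getD 0 = (d : Int) := by
  interval_cases d <;> decide

theorem castSum (l : List Nat) (p : Nat) :
    (((l.map (fun x => x ^ p)).sum : Nat) : Int) = (l.map (fun x : Nat => (x : Int) ^ p)).sum := by
  induction l with
  | nil => simp
  | cons a t ih => simp only [List.map_cons, List.sum_cons, Nat.cast_add, ih, Nat.cast_pow]

-- the arithmetic test agrees with the string test on nonnegative inputs
theorem judge_eq_isNarc (m : Int) (hm : 0 ≤ m) : judge_Amu m = isNarc m := by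
  obtain ⟨k, rfl⟩ : ∃ k : Nat, m = (k : Int) := ⟨m.toNat, (Int.toNat_of_nonneg hm).symm⟩
  by_cases hk : k = 0
  · subst hk
    have h1 : judge_Amu ((0 : Nat) : Int) = true := by decide
    have h2 : isNarc ((0 : Nat) : Int) = true := by
      rw [isNarc]
      simp [digitsB_eq]
    rw [h1, h2]
  · have hnneg : ¬ ((k : Int) < 0) := Int.not_lt.mpr (Int.natCast_nonneg k)
    have hds : (PySem.Int.toStr (k : Int)).toList = ((Nat.digits 10 k).map Nat.digitChar).reverse := by
      rw [PySem.Int.toList_toStr, PySem.Int.toChars, if_neg hnneg, Int.toNat_natCast,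
        toDigits_eq, if_neg hk]
    have hne : Nat.digits 10 k ≠ [] := Nat.digits_ne_nil_iff_ne_zero.mpr hk
    have hp : (PySem.Str.len (PySem.Int.toStr (k : Int))).toNat = (Nat.digits 10 k).length := by
      simp [PySem.Str.len, hds]
    have hsum :
        ((PySem.Int.toStr (k : Int)).toList.map
          (fun c => ((PySem.Int.ofStr? (String.ofList [c])).getD 0)
            ^ (PySem.Str.len (PySem.Int.toStr (k : Int))).toNat)).sum
        = ((Nat.digits 10 k).map (fun d : Nat => (d : Int) ^ (Nat.digits 10 k).length)).sum := by
      rw [hds, hp, List.map_reverse, List.sum_reverse, List.map_map]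
      exact congrArg List.sum (List.map_congr_left (fun d hd => by
        simp only [Function.comp_apply]
        rw [charVal d (Nat.digits_lt_base (by norm_num) hd)]))
    rw [judge_Amu, isNarc, if_neg hnneg]
    simp only [Int.toNat_natCast, digitsB_eq, if_neg hne, hsum, castSum]

-- skipping k fruitless iterations of A's while loop
theorem skipA (k : Nat) : ∀ (f : Nat) (d u : Int),
    (∀ i : Nat, i < k → judge_Amu (d - (i : Int)) = false) →
    (∀ i : Nat, i < k → judge_Amu (u + (i : Int)) = false) →
    nearLoopA (k + f) d u = nearLoopA f (d - (k : Int)) (u + (k : Int)) := by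
  induction k with
  | zero => intro f d u _ _; simp
  | succ k ih =>
    intro f d u hd hu
    have h0d : judge_Amu d = false := by simpa using hd 0 (Nat.succ_pos k)
    have h0u : judge_Amu u = false := by simpa using hu 0 (Nat.succ_pos k)
    have hstep : (k + 1) + f = (k + f) + 1 := by omega
    rw [hstep, nearLoopA, h0d, h0u]
    simp only [Bool.false_eq_true, if_false]
    have := ih f (d - 1) (u + 1)
      (fun i hi => by
        have := hd (i + 1) (by omega)
        push_cast at this ⊢
        convert this using 2
        ring)
      (fun i hi => by
        have := hu (i + 1) (by omega)
        push_cast at this ⊢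
        convert this using 2
        ring)
    rw [this]
    congr 1 <;> push_cast <;> ring

-- skipping k fruitless iterations of B's downward while loop
theorem skipDown (k : Nat) : ∀ (f : Nat) (d : Int),
    (∀ i : Nat, i < k → isNarc (d - (i : Int)) = false) →
    downScan (k + f) d = downScan f (d - (k : Int)) := by
  induction k with
  | zero => intro f d _; simp
  | succ k ih =>
    intro f d hd
    have h0d : isNarc d = false := by simpa using hd 0 (Nat.succ_pos k)
    have hstep : (k + 1) + f = (k + f) + 1 := by omega
    rw [hstep, downScan, h0d]
    simp only [Bool.false_eq_true, if_false]
    rw [ih f (d - 1) (fun i hi => by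
      have := hd (i + 1) (by omega)
      push_cast at this ⊢
      convert this using 2
      ring)]
    congr 1
    push_cast
    ring

-- skipping k fruitless iterations of B's upward while loop
theorem skipUp (k : Nat) : ∀ (f : Nat) (u : Int),
    (∀ i : Nat, i < k → isNarc (u + (i : Int)) = false) →
    upScan (k + f) u = upScan f (u + (k : Int)) := by
  induction k with
  | zero => intro f u _; simp
  | succ k ih =>
    intro f u hu
    have h0u : isNarc u = false := by simpa using hu 0 (Nat.succ_pos k)
    have hstep : (k + 1) + f = (k + f) + 1 := by omega
    rw [hstep, upScan, h0u]
    simp only [Bool.false_eq_true, if_false]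
    rw [ih f (u + 1) (fun i hi => by
      have := hu (i + 1) (by omega)
      push_cast at this ⊢
      convert this using 2
      ring)]
    congr 1
    push_cast
    ring

theorem judge_zero : judge_Amu 0 = true := by decide

theorem judge_big : judge_Amu 4679307774 = true := by decide

theorem main_eq (n : Int) (hn : 0 ≤ n) (hb : n ≤ 2147483648) : near_Amu n = near_Amu_alt n := by
  have hExD : ∃ i : Nat, judge_Amu (n - (i : Int)) = true :=
    ⟨n.toNat, by rw [show n - (n.toNat : Int) = 0 by omega]; exact judge_zero⟩
  have hExU : ∃ i : Nat, judge_Amu (n + (i : Int)) = true :=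
    ⟨(4679307774 - n).toNat, by
      rw [show n + ((4679307774 - n).toNat : Int) = 4679307774 by omega]; exact judge_big⟩
  set kd := Nat.find hExD with hkddef
  set ku := Nat.find hExU with hkudef
  have hkd_le : kd ≤ n.toNat := Nat.find_min' hExD (by
    rw [show n - (n.toNat : Int) = 0 by omega]; exact judge_zero)
  have hku_le : ku ≤ (4679307774 - n).toNat := Nat.find_min' hExU (by
    rw [show n + ((4679307774 - n).toNat : Int) = 4679307774 by omega]; exact judge_big)
  have hDtrue : judge_Amu (n - (kd : Int)) = true := Nat.find_spec hExD
  have hUtrue : judge_Amu (n + (ku : Int)) = true := Nat.find_spec hExU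
  have hDfalse : ∀ i : Nat, i < kd → judge_Amu (n - (i : Int)) = false :=
    fun i hi => Bool.eq_false_iff.mpr (Nat.find_min hExD hi)
  have hUfalse : ∀ i : Nat, i < ku → judge_Amu (n + (i : Int)) = false :=
    fun i hi => Bool.eq_false_iff.mpr (Nat.find_min hExU hi)
  -- value of A
  have hA : near_Amu n = if kd ≤ ku then n - (kd : Int) else n + (ku : Int) := by
    rw [near_Amu]
    set m := min kd ku with hmdef
    have hm_le : m ≤ n.toNat := le_trans (min_le_left _ _) hkd_le
    rw [show n.toNat + 1 = m + (n.toNat - m + 1) by omega,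
      skipA m _ n n (fun i hi => hDfalse i (lt_of_lt_of_le hi (min_le_left _ _)))
        (fun i hi => hUfalse i (lt_of_lt_of_le hi (min_le_right _ _))),
      nearLoopA]
    by_cases hc : kd ≤ ku
    · have hmeq : m = kd := by omega
      rw [if_pos hc, hmeq, hDtrue]
      simp
    · have hmeq : m = ku := by omega
      rw [if_neg hc, hmeq, hDfalse ku (by omega), hUtrue]
      simp
  -- value of B's two scans
  have hDnn : ∀ i : Nat, i ≤ kd → 0 ≤ n - (i : Int) := fun i hi => by omega
  have hDown : downScan (n.toNat + 1) n = n - (kd : Int) := by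
    rw [show n.toNat + 1 = kd + (n.toNat - kd + 1) by omega,
      skipDown kd _ n (fun i hi => by
        rw [← judge_eq_isNarc _ (hDnn i (le_of_lt hi))]; exact hDfalse i hi),
      downScan, ← judge_eq_isNarc _ (hDnn kd le_rfl), hDtrue]
    simp
  have hUp : upScan (4679307775 - n).toNat n = n + (ku : Int) := by
    rw [show (4679307775 - n).toNat = ku + ((4679307775 - n).toNat - ku - 1 + 1) by omega,
      skipUp ku _ n (fun i hi => by
        rw [← judge_eq_isNarc _ (by omega : (0:Int) ≤ n + (i : Int))]; exact hUfalse i hi),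
      upScan, ← judge_eq_isNarc _ (by omega : (0:Int) ≤ n + (ku : Int)), hUtrue]
    simp
  rw [hA, near_Amu_alt]
  simp only [hDown, hUp]
  rw [show n - (n - (kd : Int)) = (kd : Int) by ring, show n + (ku : Int) - n = (ku : Int) by ring]
  by_cases hc : kd ≤ ku
  · rw [if_pos hc, if_pos (by exact_mod_cast hc)]
  · rw [if_neg hc, if_neg (by exact_mod_cast hc)]

-- ===== VERDICT (by name: the statement is the Claim_ definition above) =====
theorem near_Amu_spec : Claim_equal_near_Amu := by
  intro n hdom hpre
  unfold Spec_near_Amu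
  unfold Dom_near_Amu pvDomInt at hdom
  have hb : n ≤ 2147483648 := (of_decide_eq_true hdom).2
  exact main_eq n hpre hb
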